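-- pv_equiv track=rewrite | github.com/MrBrantCode/unitest_baseline | mut_generate/mist_train_cf/cf_82647/solution.py | calculate_gravel
-- ===== SOURCE A (Python) =====
-- def calculate_gravel(path_weight):
--     # Assume that the order of the gravel types is from
--     # heaviest to lightest to have the minimum amount of pieces.
--
--     weights = [3, 2, 1]
--     quantities = [0, 0, 0]
--
--     for i, weight in enumerate(weights):
--         while path_weight - weight >= 0:
--             quantities[i] += 1
--             path_weight -= weight
--
--     return quantities
-- ===== SOURCE B (Python) =====
-- def calculate_gravel(path_weight):
--     m = max(path_weight, 0)
--     return [m // 3, m % 3 // 2, m % 3 % 2]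
-- ===== Notes on version B (the rewrite author's own statement) =====
-- stated objective: faster
-- what changed: replaces the repeated-subtraction while loops with closed-form integer division/modulo on max(path_weight,0)
import Mathlib
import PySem

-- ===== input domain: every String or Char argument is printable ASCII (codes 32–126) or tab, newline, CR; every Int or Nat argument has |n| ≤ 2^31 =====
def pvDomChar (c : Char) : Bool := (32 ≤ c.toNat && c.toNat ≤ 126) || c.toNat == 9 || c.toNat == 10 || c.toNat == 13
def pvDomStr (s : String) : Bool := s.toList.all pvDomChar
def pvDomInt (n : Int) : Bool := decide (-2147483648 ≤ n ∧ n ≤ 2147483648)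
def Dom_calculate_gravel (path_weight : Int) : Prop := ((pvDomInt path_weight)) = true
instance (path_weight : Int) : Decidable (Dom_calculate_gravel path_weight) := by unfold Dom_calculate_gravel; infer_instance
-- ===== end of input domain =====

-- B replaces A's repeated-subtraction while loops with closed-form integer division/modulo (asymptotically faster).
-- ===== PORT A =====
-- while path_weight - weight >= 0: quantities[i] += 1; path_weight -= weight
def pyWhileSub (w : Int) (hw : 1 ≤ w) (q n : Int) : Int × Int :=
  if _h : n - w ≥ 0 then pyWhileSub w hw (q + 1) (n - w) else (q, n)
termination_by n.toNat
decreasing_by omega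

def calculate_gravel (path_weight : Int) : List Int :=
  let r3 := pyWhileSub 3 (by norm_num) 0 path_weight
  let r2 := pyWhileSub 2 (by norm_num) 0 r3.2
  let r1 := pyWhileSub 1 (by norm_num) 0 r2.2
  [r3.1, r2.1, r1.1]

-- ===== PORT B =====
def calculate_gravel_alt (path_weight : Int) : List Int :=
  let m := max path_weight 0
  [PySem.Int.floordiv m 3,
   PySem.Int.floordiv (PySem.Int.mod m 3) 2,
   PySem.Int.mod (PySem.Int.mod m 3) 2]

-- ===== PRECONDITION & SPEC =====
def Spec_calculate_gravel (path_weight : Int) (out : List Int) : Prop := out = calculate_gravel_alt path_weight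
instance (path_weight : Int) (out : List Int) : Decidable (Spec_calculate_gravel path_weight out) := by unfold Spec_calculate_gravel; infer_instance

-- ===== CLAIM (what is proved, stated in full; the proofs are below) =====
def Claim_equal_calculate_gravel : Prop := ∀ (path_weight : Int), Dom_calculate_gravel path_weight → Spec_calculate_gravel path_weight (calculate_gravel path_weight)

-- ===== LEMMAS AND PROOFS =====

-- ===== VERDICT (by name: the statement is the Claim_ definition above) =====
-- loop characterisation: for positive w, the while loop computes (q + n/w, n%w) on 0 ≤ n
theorem pyWhileSub_spec (w : Int) (hw : 1 ≤ w) (q n : Int) (hn : 0 ≤ n) :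
    pyWhileSub w hw q n = (q + n / w, n % w) := by
  fun_induction pyWhileSub w hw q n with
  | case1 q n h ih =>
    rw [ih (by omega)]
    have hdiv : n / w = (n - w) / w + 1 := by
      rw [show n = (n - w) + 1 * w by ring, Int.add_mul_ediv_right _ _ (by omega : w ≠ 0)]
      ring_nf
    have hmod : n % w = (n - w) % w := (Int.sub_emod_right n w).symm
    rw [hdiv, hmod]; ring_nf
  | case2 q n h =>
    have h1 : n / w = 0 := Int.ediv_eq_zero_of_lt hn (by omega)
    have h2 : n % w = n := Int.emod_eq_of_lt hn (by omega)
    rw [h1, h2]; ring_nf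

-- the loop is a no-op when n < 0
theorem pyWhileSub_neg (w : Int) (hw : 1 ≤ w) (q n : Int) (hn : n < 0) :
    pyWhileSub w hw q n = (q, n) := by
  rw [pyWhileSub]
  simp only [ge_iff_le, dif_neg (by omega : ¬ (0:Int) ≤ n - w)]

theorem calculate_gravel_spec : Claim_equal_calculate_gravel := by
  intro n _
  unfold Spec_calculate_gravel calculate_gravel calculate_gravel_alt
  by_cases hn : 0 ≤ n
  · have hm : max n 0 = n := by omega
    have h3 : (0:Int) ≤ n % 3 := Int.emod_nonneg n (by norm_num)
    have h2 : (0:Int) ≤ n % 3 % 2 := Int.emod_nonneg _ (by norm_num)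
    simp only [pyWhileSub_spec 3 (by norm_num) 0 n hn,
      pyWhileSub_spec 2 (by norm_num) 0 (n % 3) h3,
      pyWhileSub_spec 1 (by norm_num) 0 (n % 3 % 2) h2, hm,
      PySem.Int.floordiv_eq_ediv_of_pos (by norm_num : (0:Int) < 3),
      PySem.Int.floordiv_eq_ediv_of_pos (by norm_num : (0:Int) < 2),
      PySem.Int.mod_eq_emod_of_pos (by norm_num : (0:Int) < 3),
      PySem.Int.mod_eq_emod_of_pos (by norm_num : (0:Int) < 2)]
    simp
  · have hm : max n 0 = 0 := by omega
    have hneg : n < 0 := by omega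
    simp only [pyWhileSub_neg 3 (by norm_num) 0 n hneg,
      pyWhileSub_neg 2 (by norm_num) 0 n hneg,
      pyWhileSub_neg 1 (by norm_num) 0 n hneg, hm]
    decide
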